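-- pv_equiv track=rewrite | github.com/TorMatzAndren/Jarri-Benchmark | benchmark/evaluators/evaluate_constrained_rewrite_v2.py | determine_failure_stage
-- ===== SOURCE A (Python) =====
-- def determine_failure_stage(execution_status: str, failure_subtype: list[str]) -> str | None:
--     if execution_status != "ok":
--         return "format"
--
--     if not failure_subtype:
--         return None
--
--     semantic_subtypes = {
--         "missing_required_phrase",
--         "partial_semantic_match",
--     }
--     constraint_subtypes = {
--         "word_count_violation",
--         "missing_required_token",
--         "forbidden_punctuation_present",
--         "terminal_punctuation_violation",
--     }
--
--     if any(subtype in semantic_subtypes for subtype in failure_subtype):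
--         return "semantic"
--     if any(subtype in constraint_subtypes for subtype in failure_subtype):
--         return "constraint"
--
--     return "format"
-- ===== SOURCE B (Python) =====
-- def determine_failure_stage(execution_status: str, failure_subtype: list[str]) -> str | None:
--     if execution_status != "ok":
--         return "format"
--     if not failure_subtype:
--         return None
--
--     priority = {
--         "missing_required_phrase": 0,
--         "partial_semantic_match": 0,
--         "word_count_violation": 1,
--         "missing_required_token": 1,
--         "forbidden_punctuation_present": 1,
--         "terminal_punctuation_violation": 1,
--     }
--
--     best = None
--     for subtype in failure_subtype:
--         rank = priority.get(subtype)
--         if rank is not None and (best is None or rank < best):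
--             best = rank
--
--     if best == 0:
--         return "semantic"
--     if best == 1:
--         return "constraint"
--     return "format"
-- ===== Notes on version B (the rewrite author's own statement) =====
-- stated objective: alternative
-- what changed: Replaces A's two separate any()-scans over two sets by a single pass over the list against one subtype->priority table, tracking the minimum rank found and resolving semantic/constraint/format from it after the loop.
import Mathlib
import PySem

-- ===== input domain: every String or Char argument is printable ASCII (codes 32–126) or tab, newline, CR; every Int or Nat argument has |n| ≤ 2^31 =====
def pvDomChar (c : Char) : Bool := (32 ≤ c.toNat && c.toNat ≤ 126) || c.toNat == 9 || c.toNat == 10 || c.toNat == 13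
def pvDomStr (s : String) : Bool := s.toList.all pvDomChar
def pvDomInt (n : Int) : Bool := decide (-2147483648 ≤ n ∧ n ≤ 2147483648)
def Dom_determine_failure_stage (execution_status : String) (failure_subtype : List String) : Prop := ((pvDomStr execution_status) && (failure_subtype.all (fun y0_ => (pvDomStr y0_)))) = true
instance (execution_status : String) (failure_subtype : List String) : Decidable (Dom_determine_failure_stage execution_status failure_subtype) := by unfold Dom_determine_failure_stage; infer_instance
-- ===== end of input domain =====

-- B replaces A's two separate any()-scans over two sets by a single pass against one
-- subtype->priority table, tracking the minimum rank and resolving the stage after the loop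
-- (alternative decomposition, same cost).


-- ===== PORT A =====
def pvSemanticSubtypes : PySem.Set String :=
  PySem.Set.ofList ["missing_required_phrase", "partial_semantic_match"]

def pvConstraintSubtypes : PySem.Set String :=
  PySem.Set.ofList ["word_count_violation", "missing_required_token",
                    "forbidden_punctuation_present", "terminal_punctuation_violation"]

def determine_failure_stage (execution_status : String) (failure_subtype : List String) : Option String :=
  if execution_status ≠ "ok" then some "format"
  else if failure_subtype = [] then none
  else if failure_subtype.any (fun subtype => PySem.Set.contains pvSemanticSubtypes subtype) then some "semantic"
  else if failure_subtype.any (fun subtype => PySem.Set.contains pvConstraintSubtypes subtype) then some "constraint"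
  else some "format"

-- ===== PORT B =====
def pvPriority : PySem.Dict String Int :=
  PySem.Dict.ofList
    [("missing_required_phrase", 0), ("partial_semantic_match", 0),
     ("word_count_violation", 1), ("missing_required_token", 1),
     ("forbidden_punctuation_present", 1), ("terminal_punctuation_violation", 1)]

def pvStep (best : Option Int) (subtype : String) : Option Int :=
  match PySem.Dict.get? pvPriority subtype with
  | none => best
  | some rank =>
    match best with
    | none => some rank
    | some b => if rank < b then some rank else best

def determine_failure_stage_alt (execution_status : String) (failure_subtype : List String) : Option String :=
  if execution_status ≠ "ok" then some "format"
  else if failure_subtype = [] then none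
  else
    let best := failure_subtype.foldl pvStep none
    if best = some 0 then some "semantic"
    else if best = some 1 then some "constraint"
    else some "format"

-- ===== PRECONDITION & SPEC =====
def Spec_determine_failure_stage (execution_status : String) (failure_subtype : List String) (out : Option String) : Prop := out = determine_failure_stage_alt execution_status failure_subtype
instance (execution_status : String) (failure_subtype : List String) (out : Option String) : Decidable (Spec_determine_failure_stage execution_status failure_subtype out) := by unfold Spec_determine_failure_stage; infer_instance

-- ===== CLAIM (what is proved, stated in full; the proofs are below) =====
def Claim_equal_determine_failure_stage : Prop := ∀ (execution_status : String) (failure_subtype : List String), Dom_determine_failure_stage execution_status failure_subtype → Spec_determine_failure_stage execution_status failure_subtype (determine_failure_stage execution_status failure_subtype)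

-- ===== LEMMAS AND PROOFS =====

-- option-minimum, the combining shape of pvStep
def pvMinO (a b : Option Int) : Option Int :=
  match a, b with
  | none, b => b
  | some x, none => some x
  | some x, some y => some (min x y)

lemma pvMinO_none_right (a : Option Int) : pvMinO a none = a := by
  cases a <;> rfl

lemma pvMinO_assoc (a b c : Option Int) : pvMinO (pvMinO a b) c = pvMinO a (pvMinO b c) := by
  cases a <;> cases b <;> cases c <;> simp [pvMinO, min_assoc]

-- the table lookup, phrased through A's two membership tests
lemma pvLookup_eq (t : String) :
    PySem.Dict.get? pvPriority t =
      (if PySem.Set.contains pvSemanticSubtypes t then some 0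
       else if PySem.Set.contains pvConstraintSubtypes t then some 1 else none) := by
  by_cases h1 : t = "missing_required_phrase"
  · subst h1; decide
  by_cases h2 : t = "partial_semantic_match"
  · subst h2; decide
  by_cases h3 : t = "word_count_violation"
  · subst h3; decide
  by_cases h4 : t = "missing_required_token"
  · subst h4; decide
  by_cases h5 : t = "forbidden_punctuation_present"
  · subst h5; decide
  by_cases h6 : t = "terminal_punctuation_violation"
  · subst h6; decide
  have hrw : pvPriority =
      (((((PySem.Dict.empty.insert "missing_required_phrase" (0:Int)).insert "partial_semantic_match" 0).insert
        "word_count_violation" 1).insert "missing_required_token" 1).insert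
        "forbidden_punctuation_present" 1).insert "terminal_punctuation_violation" 1 := by rfl
  rw [hrw]
  simp [PySem.Dict.get?_insert, pvSemanticSubtypes, pvConstraintSubtypes,
        PySem.Set.contains, PySem.Set.ofList, h1, h2, h3, h4, h5, h6]

lemma pvStep_eq (acc : Option Int) (t : String) : pvStep acc t = pvMinO acc (PySem.Dict.get? pvPriority t) := by
  unfold pvStep
  cases PySem.Dict.get? pvPriority t <;> cases acc <;>
    simp [pvMinO, min_def] <;> split_ifs <;> simp <;> omega

-- characterisation of B's single-pass fold through A's two any-scans
lemma pvFold_char (fs : List String) (acc : Option Int) :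
    fs.foldl pvStep acc =
      pvMinO acc
        (if fs.any (fun t => PySem.Set.contains pvSemanticSubtypes t) then some 0
         else if fs.any (fun t => PySem.Set.contains pvConstraintSubtypes t) then some 1 else none) := by
  induction fs generalizing acc with
  | nil => simp [pvMinO_none_right]
  | cons t fs ih =>
    rw [List.foldl_cons, ih, pvStep_eq, pvMinO_assoc, pvLookup_eq]
    congr 1
    cases hs : PySem.Set.contains pvSemanticSubtypes t <;>
      cases hc : PySem.Set.contains pvConstraintSubtypes t <;>
        cases hfs : fs.any (fun t => PySem.Set.contains pvSemanticSubtypes t) <;>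
          cases hfc : fs.any (fun t => PySem.Set.contains pvConstraintSubtypes t) <;>
            simp only [List.any_cons, hs, hc, hfs, hfc, Bool.false_or, Bool.true_or,
                       Bool.or_false, Bool.or_true] <;> decide

-- ===== VERDICT (by name: the statement is the Claim_ definition above) =====
theorem determine_failure_stage_spec : Claim_equal_determine_failure_stage := by
  intro s fs _
  unfold Spec_determine_failure_stage determine_failure_stage determine_failure_stage_alt
  by_cases hok : s = "ok"
  · simp only [hok]
    by_cases hnil : fs = []
    · simp [hnil]
    · simp only [hnil, if_false, if_neg (by simp : ¬ ("ok" : String) ≠ "ok")]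
      rw [pvFold_char fs none]
      cases hs : fs.any (fun t => PySem.Set.contains pvSemanticSubtypes t) <;>
        cases hc : fs.any (fun t => PySem.Set.contains pvConstraintSubtypes t) <;>
          simp only [hs, hc, Bool.false_eq_true, if_false, if_true, pvMinO] <;> rfl
  · simp [hok]
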